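-- pv_equiv track=rewrite | github.com/compilers-uff/expressoes-regulares-arthurnakaoiduff | utilTransiction.py | compareTransictionsAfd
-- ===== SOURCE A (Python) =====
-- def compareTransictionsAfd(transictions1, transictions2):
--   def transictionInTransictions(transiction, transictions):
--     bool = False
--
--     for t in transictions:
--       if t[0] == transiction[0]:
--         bool = True
--         if t[1] != transiction[1]:
--           return False
--
--     return bool
--
--   for state in transictions1.keys():
--     for transiction1 in transictions1[state]:
--       if state in transictions2:
--         if not transictionInTransictions(transiction1, transictions2[state]):
--           return False
--       else:
--         return False
--
--   for state in transictions2.keys():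
--     for transiction2 in transictions2[state]:
--       if state in transictions1:
--         if not transictionInTransictions(transiction2, transictions1[state]):
--           return False
--       else:
--         return False
--
--   return True
-- ===== SOURCE B (Python) =====
-- def compareTransictionsAfd(transictions1, transictions2):
--   def triples(transictions):
--     trs = set()
--     for state in transictions:
--       for t in transictions[state]:
--         trs.add((state, t[0], t[1]))
--     return trs
--
--   s1 = triples(transictions1)
--   s2 = triples(transictions2)
--   if s1 != s2:
--     return False
--   return all(not any(x[0] == t[0] and x[1] == t[1] and x[2] != t[2] for x in s1)
--              for t in s1)
-- ===== Notes on version B (the rewrite author's own statement) =====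
-- stated objective: alternative
-- what changed: Replaces A's two symmetric nested membership scans (each transition looked up by an inner linear scan of the other dict's list) with building the set of (state,symbol,target) triples of each dict once, comparing the two sets, and then checking that no (state,symbol) pair carries two distinct targets.
import Mathlib
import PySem

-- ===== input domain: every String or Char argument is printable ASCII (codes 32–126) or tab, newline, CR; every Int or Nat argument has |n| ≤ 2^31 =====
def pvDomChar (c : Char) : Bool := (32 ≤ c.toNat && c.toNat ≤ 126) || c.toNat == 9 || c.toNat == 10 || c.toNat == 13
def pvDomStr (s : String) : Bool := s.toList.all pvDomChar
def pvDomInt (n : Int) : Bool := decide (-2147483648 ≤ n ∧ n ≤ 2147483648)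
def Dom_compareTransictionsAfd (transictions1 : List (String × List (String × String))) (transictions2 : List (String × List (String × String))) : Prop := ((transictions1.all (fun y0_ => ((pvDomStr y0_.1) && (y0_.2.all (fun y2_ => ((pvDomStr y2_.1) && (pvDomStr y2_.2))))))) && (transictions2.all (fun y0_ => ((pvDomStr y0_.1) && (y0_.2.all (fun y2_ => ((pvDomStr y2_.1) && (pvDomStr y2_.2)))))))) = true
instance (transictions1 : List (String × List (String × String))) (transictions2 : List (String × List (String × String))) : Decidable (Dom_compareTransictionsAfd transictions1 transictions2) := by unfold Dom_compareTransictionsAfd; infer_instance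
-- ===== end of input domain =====

-- B replaces A's two symmetric nested membership scans by one triple-set build per dict,
-- a set comparison, and a determinism (no-conflicting-target) check: alternative algorithm, same result.

-- ===== PORT A =====
-- A's inner helper transictionInTransictions: linear scan keeping the 'bool' flag, early False on a conflict.
def pvTIn (tr : String × String) : List (String × String) → Bool → Bool
  | [], b => b
  | t :: rest, b =>
    if t.1 == tr.1 then
      if t.2 != tr.2 then false else pvTIn tr rest true
    else pvTIn tr rest b

-- first-match association-list lookup ('state in d' + 'd[state]' fused; dict keys are unique under Pre_)
def pvLookup (d : List (String × List (String × String))) (k : String) : Option (List (String × String)) :=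
  match d with
  | [] => none
  | p :: rest => if p.1 == k then some p.2 else pvLookup rest k

-- one of A's two symmetric loops: every transition of d1 must pass transictionInTransictions against d2[state]
def pvSide (d1 d2 : List (String × List (String × String))) : Bool :=
  d1.all (fun p => p.2.all (fun tr =>
    match pvLookup d2 p.1 with
    | some ts => pvTIn tr ts false
    | none => false))

def compareTransictionsAfd (transictions1 : List (String × List (String × String))) (transictions2 : List (String × List (String × String))) : Bool :=
  pvSide transictions1 transictions2 && pvSide transictions2 transictions1

-- ===== PORT B =====
-- set of (state, symbol, target) triples of a transitions dict (Source B's triples())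
def pvTriples (d : List (String × List (String × String))) : PySem.Set (String × String × String) :=
  d.foldl (fun s p => p.2.foldl (fun s t => PySem.Set.add s (p.1, t.1, t.2)) s) PySem.Set.empty

def compareTransictionsAfd_alt (transictions1 : List (String × List (String × String))) (transictions2 : List (String × List (String × String))) : Bool :=
  let s1 := pvTriples transictions1
  let s2 := pvTriples transictions2
  if !(PySem.Set.equal s1 s2) then false
  else s1.all (fun t => !(s1.any (fun x => x.1 == t.1 && x.2.1 == t.2.1 && x.2.2 != t.2.2)))

-- ===== PRECONDITION & SPEC =====
-- Pre_ excludes association lists with duplicate state keys: those do not represent any Python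
-- dict (dict keys are unique), so A is never run on them.
def Pre_compareTransictionsAfd (transictions1 : List (String × List (String × String))) (transictions2 : List (String × List (String × String))) : Prop :=
  (transictions1.map Prod.fst).Nodup ∧ (transictions2.map Prod.fst).Nodup
instance (transictions1 : List (String × List (String × String))) (transictions2 : List (String × List (String × String))) : Decidable (Pre_compareTransictionsAfd transictions1 transictions2) := by unfold Pre_compareTransictionsAfd; infer_instance

def pvWitness_compareTransictionsAfd : (List (String × List (String × String))) × (List (String × List (String × String))) :=
  ([("q0", [("a", "q1"), ("b", "q0")]), ("q1", [("a", "q1")])],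
   [("q1", [("a", "q1")]), ("q0", [("b", "q0"), ("a", "q1")])])

def Spec_compareTransictionsAfd (transictions1 : List (String × List (String × String))) (transictions2 : List (String × List (String × String))) (out : Bool) : Prop := out = compareTransictionsAfd_alt transictions1 transictions2
instance (transictions1 : List (String × List (String × String))) (transictions2 : List (String × List (String × String))) (out : Bool) : Decidable (Spec_compareTransictionsAfd transictions1 transictions2 out) := by unfold Spec_compareTransictionsAfd; infer_instance

-- ===== CLAIM (what is proved, stated in full; the proofs are below) =====
def Claim_equal_compareTransictionsAfd : Prop := ∀ (transictions1 : List (String × List (String × String))) (transictions2 : List (String × List (String × String))), Dom_compareTransictionsAfd transictions1 transictions2 → Pre_compareTransictionsAfd transictions1 transictions2 → Spec_compareTransictionsAfd transictions1 transictions2 (compareTransictionsAfd transictions1 transictions2)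

-- ===== LEMMAS AND PROOFS =====

-- 'd has a transition g on symbol c from state s' (the shared semantic notion)
def pvTg (d : List (String × List (String × String))) (s c g : String) : Prop :=
  ∃ ts, (s, ts) ∈ d ∧ (c, g) ∈ ts

lemma pvTIn_iff (tr : String × String) (ts : List (String × String)) (b : Bool) :
    pvTIn tr ts b = true ↔
      ((b = true ∨ ∃ t ∈ ts, t.1 = tr.1) ∧ ∀ t ∈ ts, t.1 = tr.1 → t.2 = tr.2) := by
  induction ts generalizing b with
  | nil => simp [pvTIn]
  | cons t rest ih =>
    by_cases h1 : t.1 = tr.1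
    · by_cases h2 : t.2 = tr.2
      · have e : pvTIn tr (t :: rest) b = pvTIn tr rest true := by
          simp [pvTIn, h1, h2]
        rw [e, ih]
        constructor
        · rintro ⟨_, hall⟩
          refine ⟨Or.inr ⟨t, List.mem_cons_self, h1⟩, ?_⟩
          intro u hu h
          rcases List.mem_cons.mp hu with rfl | hu
          · exact h2
          · exact hall u hu h
        · rintro ⟨_, hall⟩
          exact ⟨Or.inl rfl, fun u hu h => hall u (List.mem_cons_of_mem _ hu) h⟩
      · have e : pvTIn tr (t :: rest) b = false := by
          simp [pvTIn, h1, h2]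
        rw [e]
        constructor
        · intro h; exact absurd h (by simp)
        · rintro ⟨_, hall⟩; exact absurd (hall t List.mem_cons_self h1) h2
    · have e : pvTIn tr (t :: rest) b = pvTIn tr rest b := by
        simp [pvTIn, h1]
      rw [e, ih]
      constructor
      · rintro ⟨hex, hall⟩
        refine ⟨?_, ?_⟩
        · rcases hex with hb | ⟨u, hu, h⟩
          · exact Or.inl hb
          · exact Or.inr ⟨u, List.mem_cons_of_mem _ hu, h⟩
        · intro u hu h
          rcases List.mem_cons.mp hu with rfl | hu
          · exact absurd h h1
          · exact hall u hu h
      · rintro ⟨hex, hall⟩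
        refine ⟨?_, fun u hu h => hall u (List.mem_cons_of_mem _ hu) h⟩
        rcases hex with hb | ⟨u, hu, h⟩
        · exact Or.inl hb
        · rcases List.mem_cons.mp hu with rfl | hu2
          · exact absurd h h1
          · exact Or.inr ⟨u, hu2, h⟩

lemma pvLookup_eq_some_of_mem {d : List (String × List (String × String))} {s : String}
    {ts : List (String × String)} (hnd : (d.map Prod.fst).Nodup) (h : (s, ts) ∈ d) :
    pvLookup d s = some ts := by
  induction d with
  | nil => simp at h
  | cons p rest ih =>
    simp only [List.map_cons, List.nodup_cons] at hnd
    rcases List.mem_cons.mp h with h | h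
    · simp [pvLookup, ← h]
    · have hne : p.1 ≠ s := by
        intro he
        exact hnd.1 (by exact List.mem_map.mpr ⟨(s, ts), h, by simp [he]⟩)
      simp only [pvLookup, beq_iff_eq, if_neg hne]
      exact ih hnd.2 h

lemma pvLookup_mem {d : List (String × List (String × String))} {s : String}
    {ts : List (String × String)} (h : pvLookup d s = some ts) : (s, ts) ∈ d := by
  induction d with
  | nil => simp [pvLookup] at h
  | cons p rest ih =>
    by_cases he : p.1 = s
    · simp only [pvLookup, beq_iff_eq, he, if_true, Option.some.injEq] at h
      have : p = (s, ts) := by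
        cases p; cases he; cases h; rfl
      rw [this]; exact List.mem_cons_self
    · simp [pvLookup, he] at h
      exact List.mem_cons_of_mem _ (ih h)

lemma pvSide_iff (d1 d2 : List (String × List (String × String)))
    (hnd2 : (d2.map Prod.fst).Nodup) :
    pvSide d1 d2 = true ↔
      ∀ s c g, pvTg d1 s c g →
        (∃ g', pvTg d2 s c g') ∧ (∀ g', pvTg d2 s c g' → g' = g) := by
  unfold pvSide
  rw [List.all_eq_true]
  constructor
  · intro h s c g ⟨ts, hts, hcg⟩
    have := h (s, ts) hts
    rw [List.all_eq_true] at this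
    have htr := this (c, g) hcg
    simp only at htr
    cases hl : pvLookup d2 s with
    | none => rw [hl] at htr; simp at htr
    | some ts' =>
      rw [hl] at htr
      rw [pvTIn_iff] at htr
      obtain ⟨hex, hall⟩ := htr
      have hmem : (s, ts') ∈ d2 := pvLookup_mem hl
      rcases hex with h' | ⟨t, ht, ht1⟩
      · simp at h'
      constructor
      · have ht1' : t.1 = c := ht1
        exact ⟨t.2, ts', hmem, by rw [← ht1']; exact ht⟩
      · rintro g' ⟨ts'', hts'', hcg'⟩
        have : ts'' = ts' := by
          have := pvLookup_eq_some_of_mem hnd2 hts''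
          rw [hl] at this; exact (Option.some.inj this).symm
        subst this
        exact hall (c, g') hcg' rfl
  · intro h p hp
    rw [List.all_eq_true]
    intro tr htr
    have hTg : pvTg d1 p.1 tr.1 tr.2 := ⟨p.2, by exact hp, by exact htr⟩
    obtain ⟨⟨g', ts', hts', hcg'⟩, huniq⟩ := h p.1 tr.1 tr.2 hTg
    have hl : pvLookup d2 p.1 = some ts' := pvLookup_eq_some_of_mem hnd2 hts'
    simp only [hl]
    rw [pvTIn_iff]
    refine ⟨Or.inr ⟨(tr.1, g'), hcg', rfl⟩, ?_⟩
    intro t ht ht1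
    exact huniq t.2 ⟨ts', hts', by rw [← ht1]; exact ht⟩

lemma mem_pvTriples (d : List (String × List (String × String))) (x : String × String × String) :
    x ∈ pvTriples d ↔ pvTg d x.1 x.2.1 x.2.2 := by
  unfold pvTriples pvTg
  have key : ∀ (acc : PySem.Set (String × String × String)),
      x ∈ d.foldl (fun s p => p.2.foldl (fun s t => PySem.Set.add s (p.1, t.1, t.2)) s) acc ↔
        x ∈ acc ∨ ∃ ts, (x.1, ts) ∈ d ∧ (x.2.1, x.2.2) ∈ ts := by
    induction d with
    | nil => simp
    | cons p rest ih =>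
      intro acc
      rw [List.foldl_cons, ih, PySem.Set.mem_foldl_add]
      simp only [List.mem_cons]
      constructor
      · rintro (⟨hx | ⟨t, ht, hxt⟩⟩ | ⟨ts, hts, hm⟩)
        · exact Or.inl hx
        · subst hxt; exact Or.inr ⟨p.2, Or.inl rfl, by simpa using ht⟩
        · exact Or.inr ⟨ts, Or.inr hts, hm⟩
      · rintro (hx | ⟨ts, hts, hm⟩)
        · exact Or.inl (Or.inl hx)
        · rcases hts with h | h
          · refine Or.inl (Or.inr ⟨(x.2.1, x.2.2), ?_, ?_⟩)
            · have hts : ts = p.2 := congrArg Prod.snd h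
              rw [← hts]; exact hm
            · have hp1 : p.1 = x.1 := (congrArg Prod.fst h).symm
              rw [hp1]
          · exact Or.inr ⟨ts, h, hm⟩
  rw [key]
  simp [PySem.Set.empty]

lemma alt_iff (t1 t2 : List (String × List (String × String))) :
    compareTransictionsAfd_alt t1 t2 = true ↔
      (∀ x, x ∈ pvTriples t1 ↔ x ∈ pvTriples t2) ∧
      (∀ t ∈ pvTriples t1, ∀ x ∈ pvTriples t1,
        x.1 = t.1 → x.2.1 = t.2.1 → x.2.2 = t.2.2) := by
  unfold compareTransictionsAfd_alt
  cases heq : PySem.Set.equal (pvTriples t1) (pvTriples t2) with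
  | false =>
    simp only [heq, Bool.not_false, if_true]
    constructor
    · intro h; exact absurd h (by simp)
    · rintro ⟨hmem, -⟩
      rw [(PySem.Set.equal_iff _ _).mpr hmem] at heq
      exact absurd heq (by simp)
  | true =>
    have hmem := (PySem.Set.equal_iff _ _).mp heq
    simp only [heq, Bool.not_true, Bool.false_eq_true, if_false, List.all_eq_true]
    constructor
    · intro h
      refine ⟨hmem, ?_⟩
      intro t ht x hx h1 h2
      have hx' := h t ht
      simp only [Bool.not_eq_true', List.any_eq_false] at hx'
      have hx'' := hx' x hx
      by_contra hne
      simp [h1, h2, hne] at hx''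
    · intro ⟨_, hdet⟩ t ht
      rw [Bool.not_eq_true', List.any_eq_false]
      intro x hx
      by_cases h1 : x.1 = t.1
      · by_cases h2 : x.2.1 = t.2.1
        · have h3 := hdet t ht x hx h1 h2
          simp [h3]
        · simp [h2]
      · simp [h1]

-- ===== VERDICT (by name: the statement is the Claim_ definition above) =====
theorem compareTransictionsAfd_spec : Claim_equal_compareTransictionsAfd := by
  intro t1 t2 _ hpre
  unfold Spec_compareTransictionsAfd
  have hA : compareTransictionsAfd t1 t2 = true ↔ compareTransictionsAfd_alt t1 t2 = true := by
    unfold compareTransictionsAfd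
    rw [Bool.and_eq_true, pvSide_iff t1 t2 hpre.2, pvSide_iff t2 t1 hpre.1, alt_iff]
    constructor
    · intro ⟨h12, h21⟩
      constructor
      · intro x
        rw [mem_pvTriples, mem_pvTriples]
        constructor
        · intro h
          obtain ⟨⟨g', hg'⟩, hu⟩ := h12 _ _ _ h
          rwa [hu g' hg'] at hg'
        · intro h
          obtain ⟨⟨g', hg'⟩, hu⟩ := h21 _ _ _ h
          rwa [hu g' hg'] at hg'
      · intro t ht x hx h1 h2
        rw [mem_pvTriples] at ht hx
        obtain ⟨-, hu⟩ := h12 _ _ _ ht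
        rw [h1, h2] at hx
        obtain ⟨⟨g', hg'⟩, hu'⟩ := h12 _ _ _ hx
        -- x is also a t2-transition at (t.1, t.2.1), so its target equals t's
        have hx2 : pvTg t2 t.1 t.2.1 x.2.2 := by rwa [hu' g' hg'] at hg'
        exact hu _ hx2
    · intro ⟨hmem, hdet⟩
      have hmem' : ∀ s c g, pvTg t1 s c g ↔ pvTg t2 s c g := by
        intro s c g
        have := hmem (s, c, g)
        rw [mem_pvTriples, mem_pvTriples] at this
        exact this
      have hdet' : ∀ s c g g', pvTg t1 s c g → pvTg t1 s c g' → g' = g := by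
        intro s c g g' h h'
        exact hdet (s, c, g) ((mem_pvTriples _ _).mpr h) (s, c, g') ((mem_pvTriples _ _).mpr h') rfl rfl
      constructor
      · intro s c g h
        exact ⟨⟨g, (hmem' s c g).mp h⟩, fun g' hg' => hdet' s c g g' h ((hmem' s c g').mpr hg')⟩
      · intro s c g h
        refine ⟨⟨g, (hmem' s c g).mpr h⟩, fun g' hg' => ?_⟩
        exact hdet' s c g g' ((hmem' s c g).mpr h) hg'
  cases hB : compareTransictionsAfd_alt t1 t2 with
  | true => exact hA.mpr hB
  | false =>
    cases hAv : compareTransictionsAfd t1 t2 with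
    | true => rw [hB] at hA; exact absurd (hA.mp hAv) (by simp)
    | false => rfl
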